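-- pv_equiv track=rewrite | github.com/YannFigueiredo/Simulador-AFD | registro.py | contagem
-- ===== SOURCE A (Python) =====
-- def contagem(afd, pos):
--   j = i = cont = 0
--   while j < pos:
--     if afd[i] == '}':
--       j += 1
--     cont += 1
--     i += 1
--   cont += 3
--   return cont
-- ===== SOURCE B (Python) =====
-- def contagem(afd, pos):
--   positions = [i for i, c in enumerate(afd) if c == '}']
--   if pos <= 0:
--     return 3
--   return positions[pos - 1] + 4
-- ===== Notes on version B (the rewrite author's own statement) =====
-- stated objective: alternative
-- what changed: Replaces A's char-by-char counting scan with a direct positional lookup into a precomputed table of brace positions (positions[pos-1] + 4).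
import Mathlib
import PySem

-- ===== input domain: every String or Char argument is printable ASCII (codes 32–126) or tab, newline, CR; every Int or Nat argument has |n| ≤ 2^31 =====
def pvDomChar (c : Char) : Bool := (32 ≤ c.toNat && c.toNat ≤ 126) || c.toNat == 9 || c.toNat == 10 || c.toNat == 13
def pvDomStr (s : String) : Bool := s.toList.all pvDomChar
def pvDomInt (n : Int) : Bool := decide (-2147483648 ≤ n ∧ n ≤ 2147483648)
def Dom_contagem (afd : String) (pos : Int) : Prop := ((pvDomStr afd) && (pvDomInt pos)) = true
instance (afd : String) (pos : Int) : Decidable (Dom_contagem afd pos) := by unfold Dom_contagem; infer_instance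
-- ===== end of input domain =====

-- B replaces A's count-until-pos scan by a precomputed table of brace positions with a direct lookup (alternative decomposition, similar cost).


-- ===== PORT A =====
-- while j < pos: read afd[i], bump j on '}', bump cont and i.  Reading past the end
-- (Python's IndexError, excluded by Pre_) returns the current cont + 3 here.
def contagemLoop (cs : List Char) (pos j cont : Int) : Int :=
  if j < pos then
    match cs with
    | [] => cont + 3
    | c :: rest => contagemLoop rest pos (if c = '}' then j + 1 else j) (cont + 1)
  else cont + 3

def contagem (afd : String) (pos : Int) : Int :=
  contagemLoop afd.toList pos 0 0

-- ===== PORT B =====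
-- positions = [i for i, c in enumerate(afd) if c == '}']; out-of-range lookup
-- (Python's IndexError, excluded by Pre_) returns 0 here.
def contagem_alt (afd : String) (pos : Int) : Int :=
  let positions : List Int :=
    ((PySem.List.enumerate afd.toList 0).filter (fun p => p.2 == '}')).map (fun p => p.1)
  if pos ≤ 0 then 3
  else
    match PySem.List.pyGet? positions (pos - 1) with
    | some m => m + 4
    | none => 0

-- ===== PRECONDITION & SPEC =====
-- Pre_ excludes exactly the inputs where A raises IndexError: fewer than pos braces in afd.
def Pre_contagem (afd : String) (pos : Int) : Prop :=
  pos ≤ (afd.toList.count '}' : Int)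
instance (afd : String) (pos : Int) : Decidable (Pre_contagem afd pos) := by
  unfold Pre_contagem; infer_instance
def pvWitness_contagem : String × Int := ("a}b}c", 2)

def Spec_contagem (afd : String) (pos : Int) (out : Int) : Prop := out = contagem_alt afd pos
instance (afd : String) (pos : Int) (out : Int) : Decidable (Spec_contagem afd pos out) := by unfold Spec_contagem; infer_instance

-- ===== CLAIM (what is proved, stated in full; the proofs are below) =====
def Claim_equal_contagem : Prop := ∀ (afd : String) (pos : Int), Dom_contagem afd pos → Pre_contagem afd pos → Spec_contagem afd pos (contagem afd pos)

-- ===== LEMMAS AND PROOFS =====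

-- number of characters A consumes to pass k closing braces (0 if k ≤ 0 or the list ends)
def steps (cs : List Char) (k : Int) : Int :=
  if k ≤ 0 then 0
  else
    match cs with
    | [] => 0
    | c :: rest => 1 + steps rest (if c = '}' then k - 1 else k)

theorem steps_nonpos (cs : List Char) (k : Int) (hk : k ≤ 0) : steps cs k = 0 := by
  cases cs <;> simp [steps, hk]

theorem steps_cons_brace (rest : List Char) (k : Int) (hk : 0 < k) :
    steps ('}' :: rest) k = 1 + steps rest (k - 1) := by
  rw [steps, if_neg (by omega)]; simp

theorem steps_cons_other (c : Char) (rest : List Char) (k : Int) (hc : c ≠ '}') (hk : 0 < k) :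
    steps (c :: rest) k = 1 + steps rest k := by
  rw [steps, if_neg (by omega)]; simp [hc]

theorem steps_nil (k : Int) : steps [] k = 0 := by
  simp [steps]

theorem contagemLoop_eq_steps (cs : List Char) (pos : Int) :
    ∀ j cont, contagemLoop cs pos j cont = cont + 3 + steps cs (pos - j) := by
  induction cs with
  | nil =>
    intro j cont
    simp only [contagemLoop]
    rw [steps_nil]
    split_ifs <;> omega
  | cons c rest ih =>
    intro j cont
    by_cases h : j < pos
    · have hstep : contagemLoop (c :: rest) pos j cont
          = contagemLoop rest pos (if c = '}' then j + 1 else j) (cont + 1) := by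
        simp only [contagemLoop, if_pos h]
      rw [hstep, ih]
      by_cases hc : c = '}'
      · subst hc
        rw [if_pos rfl, steps_cons_brace _ _ (by omega),
            show pos - (j + 1) = pos - j - 1 from by ring]
        omega
      · rw [if_neg hc, steps_cons_other _ _ _ hc (by omega)]
        omega
    · have hstep : contagemLoop (c :: rest) pos j cont = cont + 3 := by
        simp only [contagemLoop, if_neg h]
      rw [hstep, steps_nonpos _ _ (by omega)]
      omega

-- the filtered-enumerate table of brace positions, with arbitrary start offset
def pbTable (cs : List Char) (s : Int) : List Int :=
  ((PySem.List.enumerate cs s).filter (fun p => p.2 == '}')).map (fun p => p.1)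

theorem pbTable_get (cs : List Char) :
    ∀ (s : Int) (k : Nat), k < cs.count '}' →
      (pbTable cs s)[k]? = some (s + steps cs ((k : Int) + 1) - 1) := by
  induction cs with
  | nil => intro s k h; simp [List.count_nil] at h
  | cons c rest ih =>
    intro s k h
    by_cases hc : c = '}'
    · subst hc
      have hpb : pbTable ('}' :: rest) s = s :: pbTable rest (s + 1) := by
        simp [pbTable, PySem.List.enumerate_cons]
      rw [hpb]
      cases k with
      | zero =>
        rw [List.getElem?_cons_zero]
        rw [show ((0 : Nat) : Int) + 1 = 1 from by norm_num,
            steps_cons_brace _ _ (by omega), steps_nonpos _ _ (by omega)]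
        norm_num
      | succ n =>
        have hn : n < rest.count '}' := by
          simp at h; omega
        rw [List.getElem?_cons_succ, ih (s + 1) n hn]
        rw [steps_cons_brace _ _ (by omega),
            show ((n + 1 : Nat) : Int) + 1 - 1 = (n : Int) + 1 from by push_cast; ring]
        congr 1
        omega
    · have hpb : pbTable (c :: rest) s = pbTable rest (s + 1) := by
        simp [pbTable, PySem.List.enumerate_cons, hc]
      have hk : k < rest.count '}' := by
        simpa [List.count_cons, hc] using h
      rw [hpb, ih (s + 1) k hk, steps_cons_other _ _ _ hc (by omega)]
      congr 1
      omega

-- ===== VERDICT (by name: the statement is the Claim_ definition above) =====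
theorem contagem_spec : Claim_equal_contagem := by
  intro afd pos _ hpre
  unfold Spec_contagem contagem contagem_alt
  rw [contagemLoop_eq_steps]
  by_cases hp : pos ≤ 0
  · rw [if_pos hp, steps_nonpos _ _ (by omega)]
    norm_num
  · rw [if_neg hp]
    have hk : (pos - 1).toNat < afd.toList.count '}' := by
      unfold Pre_contagem at hpre; omega
    rw [show pos - 1 = (((pos - 1).toNat : Nat) : Int) from by omega,
        PySem.List.pyGet?_natCast]
    show (0 : Int) + 3 + steps afd.toList (pos - 0) =
      match (pbTable afd.toList 0)[(pos - 1).toNat]? with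
      | some m => m + 4
      | none => 0
    rw [pbTable_get afd.toList 0 (pos - 1).toNat hk,
        show (((pos - 1).toNat : Nat) : Int) + 1 = pos - 0 from by omega]
    show (0 : Int) + 3 + steps afd.toList (pos - 0) =
      0 + steps afd.toList (pos - 0) - 1 + 4
    omega
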